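-- pv_equiv track=rewrite | github.com/agostinhopina95/BRUTEFORCEWINWIFI | config.py | mkSense
-- ===== SOURCE A (Python) =====
-- import collections
--
-- def mkSense(string, limit=3):
--     frequencies = collections.Counter(string)
--     repeated = {}
--     for key, value in frequencies.items():
--         if value > 1:
--             repeated[key] = value
--
--     for attr, value in repeated.items():
--         if value > limit:
--             return False
--     return True
-- ===== SOURCE B (Python) =====
-- def mkSense(string, limit=3):
--     # sort-then-scan: equal characters become consecutive, so one pass tracking
--     # the current run length replaces the Counter frequency table
--     prev = None
--     run = 0
--     for ch in sorted(string):
--         run = run + 1 if ch == prev else 1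
--         prev = ch
--         if run > 1 and run > limit:
--             return False
--     return True
-- ===== Notes on version B (the rewrite author's own statement) =====
-- stated objective: alternative
-- what changed: Replaces the Counter frequency table plus two dict loops with sort-then-scan: one pass over the sorted characters tracking the current run length, failing as soon as a run is both repeated and over the limit.
import Mathlib
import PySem

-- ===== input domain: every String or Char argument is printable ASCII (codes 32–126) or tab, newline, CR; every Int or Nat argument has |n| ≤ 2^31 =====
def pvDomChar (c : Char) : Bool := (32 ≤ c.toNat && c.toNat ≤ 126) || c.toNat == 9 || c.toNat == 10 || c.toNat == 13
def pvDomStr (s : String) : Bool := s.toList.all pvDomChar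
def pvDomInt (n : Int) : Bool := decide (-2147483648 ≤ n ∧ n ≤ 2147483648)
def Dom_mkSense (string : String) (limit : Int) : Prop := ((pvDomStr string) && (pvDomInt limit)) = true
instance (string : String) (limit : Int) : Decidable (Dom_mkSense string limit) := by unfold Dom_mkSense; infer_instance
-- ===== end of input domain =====

-- B replaces A's Counter frequency table with sort-then-run-length-scan (alternative algorithm, same result).

-- ===== PORT A =====
-- the second Python loop: 'for attr, value in repeated.items(): if value > limit: return False' / 'return True'
def mkSenseLoop (limit : Int) : List (Char × Int) → Bool
  | [] => true
  | kv :: rest => if limit < kv.2 then false else mkSenseLoop limit rest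

def mkSense (string : String) (limit : Int) : Bool :=
  let frequencies := PySem.Dict.counter string.toList
  let repeated := frequencies.items.foldl
    (fun r kv => if 1 < kv.2 then r.insert kv.1 kv.2 else r) PySem.Dict.empty
  mkSenseLoop limit repeated.items

-- ===== PORT B =====
-- the for-loop of Source B over sorted(string): state = (prev, run); prev = none is Python's initial None
def mkSenseAltLoop (limit : Int) : Option Char → Int → List Char → Bool
  | _, _, [] => true
  | prev, run, ch :: rest =>
    let run' := if some ch == prev then run + 1 else 1
    if 1 < run' && limit < run' then false
    else mkSenseAltLoop limit (some ch) run' rest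

def mkSense_alt (string : String) (limit : Int) : Bool :=
  mkSenseAltLoop limit none 0 (PySem.List.sorted string.toList (fun c => c) false)

-- ===== PRECONDITION & SPEC =====
def Spec_mkSense (string : String) (limit : Int) (out : Bool) : Prop := out = mkSense_alt string limit
instance (string : String) (limit : Int) (out : Bool) : Decidable (Spec_mkSense string limit out) := by unfold Spec_mkSense; infer_instance

-- ===== CLAIM (what is proved, stated in full; the proofs are below) =====
def Claim_equal_mkSense : Prop := ∀ (string : String) (limit : Int), Dom_mkSense string limit → Spec_mkSense string limit (mkSense string limit)

-- ===== LEMMAS AND PROOFS =====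

-- A-side: the early-return loop is an 'all' over the items
theorem mkSenseLoop_eq_true_iff (limit : Int) (ps : List (Char × Int)) :
    mkSenseLoop limit ps = true ↔ ∀ kv ∈ ps, kv.2 ≤ limit := by
  induction ps with
  | nil => simp [mkSenseLoop]
  | cons kv rest ih =>
    simp only [mkSenseLoop]
    split_ifs with h
    · constructor
      · intro hfalse; cases hfalse
      · intro hall; exact absurd (hall kv (by simp)) (by omega)
    · simp [ih]; intro _; omega

-- A-side: the filtering insert-loop over fresh distinct keys appends exactly the filtered items
theorem items_foldl_filter (ps : List (Char × Int)) (acc : PySem.Dict Char Int)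
    (hnd : (ps.map Prod.fst).Nodup) (hfresh : ∀ kv ∈ ps, acc.contains kv.1 = false) :
    (ps.foldl (fun r kv => if 1 < kv.2 then r.insert kv.1 kv.2 else r) acc).items
      = acc.items ++ ps.filter (fun kv => decide (1 < kv.2)) := by
  induction ps generalizing acc with
  | nil => simp
  | cons kv rest ih =>
    simp only [List.map_cons, List.nodup_cons] at hnd
    simp only [List.foldl_cons, List.filter_cons]
    by_cases h : 1 < kv.2
    · simp only [if_pos h, decide_eq_true h]
      rw [ih (acc.insert kv.1 kv.2) hnd.2]
      · rw [PySem.Dict.items_insert_of_not_contains acc kv.2 (hfresh kv (by simp))]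
        simp
      · intro p hp
        rw [PySem.Dict.contains_insert]
        have hne : p.1 ≠ kv.1 := by
          intro he; exact hnd.1 (he ▸ List.mem_map_of_mem hp)
        simp [hne, hfresh p (List.mem_cons_of_mem _ hp)]
    · simp only [if_neg h, decide_eq_true_eq]
      exact ih acc hnd.2 (fun p hp => hfresh p (List.mem_cons_of_mem _ hp))

-- A returns true iff every character's count is at most max 1 limit
theorem mkSense_iff (string : String) (limit : Int) :
    mkSense string limit = true ↔
      ∀ c ∈ string.toList, (string.toList.count c : Int) ≤ max 1 limit := by
  show mkSenseLoop limit ((PySem.Dict.counter string.toList).items.foldl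
      (fun r kv => if 1 < kv.2 then r.insert kv.1 kv.2 else r) PySem.Dict.empty).items = true ↔ _
  rw [items_foldl_filter _ _ ?hnd ?hfresh]
  case hnd =>
    rw [PySem.Dict.items_counter]
    rw [List.map_map]
    have hid : (Prod.fst ∘ fun k : Char => (k, (List.count k string.toList : Int))) = id := rfl
    rw [hid, List.map_id]
    exact PySem.Set.nodup_ofList string.toList
  case hfresh => intro kv _; rfl
  have he : (PySem.Dict.empty : PySem.Dict Char Int).items = [] := rfl
  rw [he, List.nil_append, mkSenseLoop_eq_true_iff,
    PySem.Dict.items_counter]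
  constructor
  · intro h c hc
    by_cases h1 : 1 < (string.toList.count c : Int)
    · have := h (c, (string.toList.count c : Int)) (by
        rw [List.mem_filter]
        exact ⟨List.mem_map_of_mem ((PySem.Set.mem_ofList _ _).mpr hc), by simpa using h1⟩)
      simp at this; omega
    · omega
  · intro h kv hkv
    rw [List.mem_filter, List.mem_map] at hkv
    obtain ⟨⟨c, hc, rfl⟩, hgt⟩ := hkv
    have := h c ((PySem.Set.mem_ofList _ _).mp hc)
    simp at hgt ⊢; omega

-- sorted-list facts for B
theorem count_eq_takeWhile (l : List Char) (hp : l.Pairwise (· ≤ ·)) (a : Char)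
    (ha : ∀ x ∈ l, a ≤ x) : l.count a = (l.takeWhile (· == a)).length := by
  induction l with
  | nil => simp
  | cons b m ih =>
    rw [List.pairwise_cons] at hp
    by_cases hab : b = a
    · subst hab
      rw [List.count_cons_self, List.takeWhile_cons_of_pos (by simp)]
      simp [ih hp.2 (fun x hx => hp.1 x hx)]
    · have hlt : a < b := lt_of_le_of_ne (ha b (by simp)) (Ne.symm hab)
      rw [List.takeWhile_cons_of_neg (by simp [hab])]
      have hnm : a ∉ m := fun hm => absurd (hp.1 a hm) (not_le.mpr hlt)
      simp [List.count_eq_zero_of_not_mem hnm, hab]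

theorem not_mem_dropWhile (l : List Char) (hp : l.Pairwise (· ≤ ·)) (a : Char)
    (ha : ∀ x ∈ l, a ≤ x) : a ∉ l.dropWhile (· == a) := by
  induction l with
  | nil => simp
  | cons b m ih =>
    rw [List.pairwise_cons] at hp
    by_cases hab : b = a
    · subst hab
      rw [List.dropWhile_cons_of_pos (by simp)]
      exact ih hp.2 (fun x hx => hp.1 x hx)
    · have hlt : a < b := lt_of_le_of_ne (ha b (by simp)) (Ne.symm hab)
      rw [List.dropWhile_cons_of_neg (by simp [hab])]
      intro hmem
      rcases List.mem_cons.mp hmem with h | h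
      · exact hab h.symm
      · exact absurd (hp.1 a h) (not_le.mpr hlt)

-- shared pure-logic bridge between the run-invariant shape and the count condition
theorem bridge (limit : Int) (a : Char) (t : List Char) (hp : (a :: t).Pairwise (· ≤ ·)) :
    ((1 + ((t.takeWhile (· == a)).length : Int) ≤ max 1 limit ∧
      ∀ c ∈ t.dropWhile (· == a), (t.count c : Int) ≤ max 1 limit) ↔
     ∀ c ∈ a :: t, ((a :: t).count c : Int) ≤ max 1 limit) := by
  rw [List.pairwise_cons] at hp
  obtain ⟨ha, hpt⟩ := hp
  have hkey : (a :: t).count a = (t.takeWhile (· == a)).length + 1 := by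
    rw [List.count_cons_self, count_eq_takeWhile t hpt a ha]
  have hanotin := not_mem_dropWhile t hpt a ha
  have hsplit := List.takeWhile_append_dropWhile (p := (· == a)) (l := t)
  constructor
  · rintro ⟨h1, h2⟩ c hc
    by_cases hca : c = a
    · subst hca; rw [hkey]; push_cast; omega
    · rcases List.mem_cons.mp hc with h | h
      · exact absurd h hca
      · have hcd : c ∈ t.dropWhile (· == a) := by
          rcases List.mem_append.mp (hsplit ▸ h) with h' | h'
          · exact absurd (by simpa using List.mem_takeWhile_imp h') hca
          · exact h'
        have hac : ¬ a = c := fun h' => hca h'.symm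
        have := h2 c hcd
        simpa [List.count_cons, hac] using this
  · intro h
    refine ⟨?_, ?_⟩
    · have := h a (by simp)
      rw [hkey] at this; push_cast at this; omega
    · intro c hc
      have hct : c ∈ t := by
        have := List.Sublist.subset (List.dropWhile_sublist (p := (· == a)) (l := t))
        exact this hc
      have hca : c ≠ a := fun he => hanotin (he ▸ hc)
      have hac : ¬ a = c := fun h' => hca h'.symm
      have := h c (List.mem_cons_of_mem _ hct)
      simpa [List.count_cons, hac] using this

-- loop invariant on a sorted list
theorem altLoop_invariant (limit : Int) (s : List Char) (hp : s.Pairwise (· ≤ ·)) :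
    ∀ (p : Char) (r : Int), 1 ≤ r → r ≤ max 1 limit →
      (mkSenseAltLoop limit (some p) r s = true ↔
        (r + ((s.takeWhile (· == p)).length : Int) ≤ max 1 limit ∧
         ∀ c ∈ s.dropWhile (· == p), (s.count c : Int) ≤ max 1 limit)) := by
  induction s with
  | nil => intro p r h1 h2; simp [mkSenseAltLoop]; omega
  | cons a t ih =>
    intro p r h1 h2
    have hp' := hp
    rw [List.pairwise_cons] at hp'
    obtain ⟨ha, hpt⟩ := hp'
    by_cases hap : a = p
    · subst hap
      have hbeq : (some a == some a) = true := by simp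
      by_cases hcond : limit < r + 1
      · have hLHS : mkSenseAltLoop limit (some a) r (a :: t) = false := by
          simp only [mkSenseAltLoop, hbeq, if_pos]
          rw [if_pos (by simp; omega)]
        rw [hLHS]
        constructor
        · intro h; cases h
        · rintro ⟨hc1, _⟩
          exfalso
          rw [List.takeWhile_cons_of_pos (p := (· == a)) (by simp)] at hc1
          push_cast [List.length_cons] at hc1; omega
      · have hLHS : mkSenseAltLoop limit (some a) r (a :: t)
            = mkSenseAltLoop limit (some a) (r + 1) t := by
          simp only [mkSenseAltLoop, hbeq, if_pos]
          rw [if_neg (by simp; omega)]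
        rw [hLHS, ih hpt a (r + 1) (by omega) (by omega)]
        rw [List.takeWhile_cons_of_pos (p := (· == a)) (by simp),
            List.dropWhile_cons_of_pos (p := (· == a)) (by simp)]
        have hanotin := not_mem_dropWhile t hpt a ha
        constructor
        · rintro ⟨hc1, hc2⟩
          refine ⟨by push_cast [List.length_cons] at hc1 ⊢; omega, ?_⟩
          intro c hc
          have hac : ¬ a = c := fun h' => hanotin (h' ▸ hc)
          have := hc2 c hc
          simpa [List.count_cons, hac] using this
        · rintro ⟨hc1, hc2⟩
          refine ⟨by push_cast [List.length_cons] at hc1 ⊢; omega, ?_⟩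
          intro c hc
          have hac : ¬ a = c := fun h' => hanotin (h' ▸ hc)
          have := hc2 c hc
          simpa [List.count_cons, hac] using this
    · have hbeq : (some a == some p) = false := by simp [hap]
      have hLHS : mkSenseAltLoop limit (some p) r (a :: t)
          = mkSenseAltLoop limit (some a) 1 t := by
        simp only [mkSenseAltLoop, hbeq]
        norm_num
      have hT1 : (1 : Int) ≤ max 1 limit := by omega
      rw [hLHS, ih hpt a 1 le_rfl hT1]
      have hb := bridge limit a t hp
      rw [List.takeWhile_cons_of_neg (p := (· == p)) (by simp [hap]),
          List.dropWhile_cons_of_neg (p := (· == p)) (by simp [hap])]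
      constructor
      · intro hL
        refine ⟨by simpa using h2, hb.mp (by
          refine ⟨?_, hL.2⟩
          have := hL.1; push_cast at this ⊢; omega)⟩
      · rintro ⟨_, hAll⟩
        have := hb.mpr hAll
        exact ⟨by have := this.1; omega, this.2⟩

theorem alt_iff (limit : Int) (s : List Char) (hp : s.Pairwise (· ≤ ·)) :
    mkSenseAltLoop limit none 0 s = true ↔ ∀ c ∈ s, (s.count c : Int) ≤ max 1 limit := by
  cases s with
  | nil => simp [mkSenseAltLoop]
  | cons a t =>
    have hp' := hp
    rw [List.pairwise_cons] at hp'
    obtain ⟨ha, hpt⟩ := hp'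
    have hLHS : mkSenseAltLoop limit none 0 (a :: t) = mkSenseAltLoop limit (some a) 1 t := by
      simp only [mkSenseAltLoop]
      norm_num
    have hT1 : (1 : Int) ≤ max 1 limit := by omega
    rw [hLHS, altLoop_invariant limit t hpt a 1 le_rfl hT1]
    have hb := bridge limit a t hp
    constructor
    · intro hL
      exact hb.mp ⟨by have := hL.1; push_cast at this ⊢; omega, hL.2⟩
    · intro hAll
      have := hb.mpr hAll
      exact ⟨by have := this.1; omega, this.2⟩

-- ===== VERDICT (by name: the statement is the Claim_ definition above) =====
theorem mkSense_spec : Claim_equal_mkSense := by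
  intro string limit _
  unfold Spec_mkSense mkSense_alt
  have hp : (PySem.List.sorted string.toList (fun c => c) false).Pairwise (· ≤ ·) :=
    PySem.List.sorted_pairwise string.toList (fun c => c)
  have hperm : (PySem.List.sorted string.toList (fun c => c) false).Perm string.toList :=
    PySem.List.sorted_perm string.toList (fun c => c) false
  rw [Bool.eq_iff_iff, mkSense_iff, alt_iff limit _ hp]
  constructor
  · intro h c hc
    rw [hperm.count_eq c]
    exact h c (hperm.mem_iff.mp hc)
  · intro h c hc
    rw [← hperm.count_eq c]
    exact h c (hperm.mem_iff.mpr hc)
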